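-- pv_equiv track=rewrite | github.com/Nada-khalied-Al-Eqrab/Crypto-Nada | CryptoNada_EN.py | playfair_process
-- ===== SOURCE A (Python) =====
-- def playfair_process(text):
--     result = []
--     i = 0
--     while i < len(text):
--         a = text[i]
--         b = text[i + 1] if i + 1 < len(text) else 'X'
--         if a == b:
--             result.append((a, 'X'))
--             i += 1
--         else:
--             result.append((a, b))
--             i += 2
--     return result
-- ===== SOURCE B (Python) =====
-- def playfair_process(text):
--     result = []
--     pending = None
--     for c in text:
--         if pending is None:
--             pending = c
--         elif pending == c:
--             result.append((pending, 'X'))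
--             pending = c
--         else:
--             result.append((pending, c))
--             pending = None
--     if pending is not None:
--         result.append((pending, 'X'))
--     return result
-- ===== Notes on version B (the rewrite author's own statement) =====
-- stated objective: alternative
-- what changed: Replaced the variable-stride (i += 1 or 2) indexed while-loop with a single character-at-a-time for-loop carrying a pending unmatched-letter accumulator, emitting the final padding pair after the loop.
import Mathlib
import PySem

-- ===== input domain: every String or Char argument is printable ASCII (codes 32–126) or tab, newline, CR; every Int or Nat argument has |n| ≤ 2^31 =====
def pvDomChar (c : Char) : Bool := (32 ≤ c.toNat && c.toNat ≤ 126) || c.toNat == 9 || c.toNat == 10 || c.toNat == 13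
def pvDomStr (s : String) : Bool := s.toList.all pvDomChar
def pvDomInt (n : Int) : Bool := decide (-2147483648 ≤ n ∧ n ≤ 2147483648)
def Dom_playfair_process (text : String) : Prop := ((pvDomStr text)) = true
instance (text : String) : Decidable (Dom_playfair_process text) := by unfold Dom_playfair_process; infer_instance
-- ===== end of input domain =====

-- B replaces A's variable-stride indexed while-loop with a one-char-at-a-time pass
-- carrying a 'pending' unmatched letter (objective: alternative decomposition, same cost).


-- ===== PORT A =====
-- A's while-loop over index i (i += 1 on an equal pair, i += 2 otherwise),
-- transliterated as recursion on the index, terminating by cs.length - i.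
def playfairALoop (cs : List Char) (i : Nat) : List (String × String) :=
  if h : i < cs.length then
    let a := cs[i]
    let b := if h2 : i + 1 < cs.length then cs[i + 1] else 'X'
    if a = b then
      (String.singleton a, "X") :: playfairALoop cs (i + 1)
    else
      (String.singleton a, String.singleton b) :: playfairALoop cs (i + 2)
  else []
termination_by cs.length - i

def playfair_process (text : String) : List (String × String) :=
  playfairALoop text.toList 0

-- ===== PORT B =====
-- B's for-loop over characters with a 'pending' accumulator, then final 'X' padding.
def playfairBLoop (pending : Option Char) (cs : List Char) : List (String × String) :=
  match cs with
  | [] =>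
    match pending with
    | none => []
    | some p => [(String.singleton p, "X")]
  | c :: rest =>
    match pending with
    | none => playfairBLoop (some c) rest
    | some p =>
      if p = c then (String.singleton p, "X") :: playfairBLoop (some c) rest
      else (String.singleton p, String.singleton c) :: playfairBLoop none rest

def playfair_process_alt (text : String) : List (String × String) :=
  playfairBLoop none text.toList

-- ===== PRECONDITION & SPEC =====
def Spec_playfair_process (text : String) (out : List (String × String)) : Prop := out = playfair_process_alt text
instance (text : String) (out : List (String × String)) : Decidable (Spec_playfair_process text out) := by unfold Spec_playfair_process; infer_instance

-- ===== CLAIM (what is proved, stated in full; the proofs are below) =====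
def Claim_equal_playfair_process : Prop := ∀ (text : String), Dom_playfair_process text → Spec_playfair_process text (playfair_process text)

-- ===== LEMMAS AND PROOFS =====

lemma playfairALoop_eq_B (cs : List Char) (i : Nat) :
    playfairALoop cs i = playfairBLoop none (cs.drop i) := by
  by_cases h : i < cs.length
  · have hdrop : cs.drop i = cs[i] :: cs.drop (i + 1) := List.drop_eq_getElem_cons h
    by_cases h2 : i + 1 < cs.length
    · have hdrop2 : cs.drop (i + 1) = cs[i + 1] :: cs.drop (i + 2) :=
        List.drop_eq_getElem_cons h2
      by_cases hab : cs[i] = cs[i + 1]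
      · rw [playfairALoop]
        simp only [h, dif_pos, h2, dif_pos, hab, if_pos]
        rw [playfairALoop_eq_B cs (i + 1), hdrop, hdrop2]
        simp [playfairBLoop, hab]
      · rw [playfairALoop]
        simp only [h, dif_pos, h2, dif_pos, hab, if_neg, not_false_iff]
        rw [playfairALoop_eq_B cs (i + 2), hdrop, hdrop2]
        simp [playfairBLoop, hab]
    · -- last character: drop (i+1) = []
      have hnil : cs.drop (i + 1) = [] := List.drop_eq_nil_of_le (by omega)
      by_cases hax : cs[i] = 'X'
      · rw [playfairALoop]
        simp only [h, dif_pos, h2, dif_neg, not_false_iff, hax, if_pos]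
        rw [playfairALoop_eq_B cs (i + 1), hdrop, hnil]
        simp [playfairBLoop, hax]
      · rw [playfairALoop]
        simp only [h, dif_pos, h2, dif_neg, not_false_iff, hax, if_neg]
        rw [playfairALoop, dif_neg (by omega : ¬ i + 2 < cs.length), hdrop, hnil]
        simp [playfairBLoop]
        rfl
  · have hnil : cs.drop i = [] := List.drop_eq_nil_of_le (by omega)
    rw [playfairALoop, dif_neg h, hnil, playfairBLoop]
termination_by cs.length - i

-- ===== VERDICT (by name: the statement is the Claim_ definition above) =====
theorem playfair_process_spec : Claim_equal_playfair_process := by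
  intro text _
  unfold Spec_playfair_process playfair_process playfair_process_alt
  simpa using playfairALoop_eq_B text.toList 0
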